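-- pv_equiv track=rewrite | github.com/tmcrosario/odoo-tmc | tmc/models/document.py | lookahead
-- ===== SOURCE A (Python) =====
-- def lookahead(iterable):
--     """Pass through all values from the given iterable, augmented by the
--     information if there are more values to come after the current one
--     (True), or if it is the last value (False).
--     """
--     # Get an iterator from the iterable
--     iterator = iter(iterable)
--
--     # Get the first item from the iterator, or None if the iterator is empty
--     prev = next(iterator, None)
--
--     # Iterate through the remaining items in the iterator
--     for item in iterator:
--         # Yield the previous item and the "more to come" flag
--         yield prev, True
--         # Set the previous item to the current item
--         prev = item
--
--     # If the iterator was not empty, yield the last item and the "last item" flag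
--     if prev:
--         yield prev, False
-- ===== SOURCE B (Python) =====
-- def lookahead(iterable):
--     """Pass through all values from the given iterable, augmented by the
--     information if there are more values to come after the current one
--     (True), or if it is the last value (False)."""
--     items = list(iterable)
--     for item in items[:-1]:
--         yield item, True
--     if items:
--         yield items[-1], False
-- ===== Notes on version B (the rewrite author's own statement) =====
-- stated objective: simpler
-- what changed: Replaces the streaming one-element look-behind buffer with a buffered pass: map True over items[:-1], then append the last item with False.
-- intended difference: On nonempty lists whose last element is 0 (falsy), A silently drops the final item because of its 'if prev:' truthiness test, while B yields (0, False) as the docstring ('pass through all values') intends. — e.g. on lookahead([1, 0]): A returns [(1, true)], B returns [(1, true), (0, false)]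
import Mathlib
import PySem

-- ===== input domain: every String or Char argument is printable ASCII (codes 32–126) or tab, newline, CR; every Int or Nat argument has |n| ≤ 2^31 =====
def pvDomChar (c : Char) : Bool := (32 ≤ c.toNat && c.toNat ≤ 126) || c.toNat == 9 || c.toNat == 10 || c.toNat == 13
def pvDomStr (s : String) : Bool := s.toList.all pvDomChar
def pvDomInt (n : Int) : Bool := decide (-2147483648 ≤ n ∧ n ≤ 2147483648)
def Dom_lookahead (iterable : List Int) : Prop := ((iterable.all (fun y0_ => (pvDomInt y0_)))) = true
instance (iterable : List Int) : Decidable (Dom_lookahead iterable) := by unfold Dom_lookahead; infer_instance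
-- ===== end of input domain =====

-- B changes the decomposition (buffered items[:-1]/items[-1] pass instead of a streaming
-- look-behind buffer) and yields the last item even when it is falsy; return value only
-- (both Pythons are generators, compared as the list of yielded pairs).

-- ===== PORT A =====
-- prev = next(iterator, None); for item in iterator: yield prev, True; prev = item;
-- finally 'if prev: yield prev, False' (on a nonempty Int list prev is the last element,
-- truthy iff ≠ 0; on an empty list prev is None, falsy).
def lookaheadGo (prev : Int) : List Int → List (Int × Bool)
  | [] => if prev ≠ 0 then [(prev, false)] else []
  | item :: rest => (prev, true) :: lookaheadGo item rest

def lookahead (iterable : List Int) : List (Int × Bool) :=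
  match iterable with
  | [] => []
  | x :: xs => lookaheadGo x xs

-- ===== PORT B =====
-- items[:-1] each with True, then (if items is nonempty) items[-1] with False.
def lookahead_alt (iterable : List Int) : List (Int × Bool) :=
  (iterable.dropLast.map (fun item => (item, true))) ++
  (match iterable.getLast? with
   | some last => [(last, false)]
   | none => [])

-- ===== PRECONDITION & SPEC =====
-- On nonempty lists whose last element is 0 (falsy), A silently drops the final item
-- because of its 'if prev:' truthiness test, while B yields (0, False) as the
-- docstring ('pass through all values') intends.
def D_lookahead (iterable : List Int) : Prop := iterable.getLast? = some 0
instance (iterable : List Int) : Decidable (D_lookahead iterable) := by unfold D_lookahead; infer_instance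

def Spec_lookahead (iterable : List Int) (out : List (Int × Bool)) : Prop := ¬ D_lookahead iterable → out = lookahead_alt iterable
instance (iterable : List Int) (out : List (Int × Bool)) : Decidable (Spec_lookahead iterable out) := by unfold Spec_lookahead; infer_instance

def pvDiffWitness_lookahead : List Int := [1, 0]
def pvDiffWitnessOut_lookahead : (List (Int × Bool)) × (List (Int × Bool)) :=
  ([(1, true)], [(1, true), (0, false)])

-- ===== CLAIM (what is proved, stated in full; the proofs are below) =====
def Claim_unchanged_lookahead : Prop := ∀ (iterable : List Int), Dom_lookahead iterable → Spec_lookahead iterable (lookahead iterable)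
def Claim_changed_lookahead : Prop := Dom_lookahead (pvDiffWitness_lookahead) ∧ D_lookahead (pvDiffWitness_lookahead) ∧ lookahead (pvDiffWitness_lookahead) = pvDiffWitnessOut_lookahead.1 ∧ lookahead_alt (pvDiffWitness_lookahead) = pvDiffWitnessOut_lookahead.2 ∧ pvDiffWitnessOut_lookahead.1 ≠ pvDiffWitnessOut_lookahead.2
def Claim_exact_lookahead : Prop := ∀ (iterable : List Int), Dom_lookahead iterable → D_lookahead iterable → lookahead iterable ≠ lookahead_alt iterable

-- ===== LEMMAS AND PROOFS =====

-- A's loop, characterised: everything but the last element with `true`, then the last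
-- element with `false` iff it is nonzero.
theorem lookaheadGo_eq (xs : List Int) : ∀ (prev : Int),
    lookaheadGo prev xs =
      ((prev :: xs).dropLast.map (fun item => (item, true))) ++
      (match (prev :: xs).getLast? with
       | some last => if last ≠ 0 then [(last, false)] else []
       | none => []) := by
  induction xs with
  | nil => intro prev; simp [lookaheadGo]
  | cons y ys ih =>
      intro prev
      simp only [lookaheadGo, ih y, List.dropLast_cons₂, List.map_cons, List.cons_append,
        List.getLast?_cons_cons]

theorem lookahead_eq (l : List Int) (h : l.getLast? ≠ some 0) :
    lookahead l = lookahead_alt l := by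
  cases l with
  | nil => rfl
  | cons x xs =>
      obtain ⟨last, hlast⟩ := List.getLast?_isSome.mpr (List.cons_ne_nil x xs) |> Option.isSome_iff_exists.mp
      have hne : last ≠ 0 := by
        intro h0; exact h (by rw [hlast, h0])
      simp [lookahead, lookahead_alt, lookaheadGo_eq, hlast, hne]

theorem lookahead_len (l : List Int) (h : l.getLast? = some 0) :
    (lookahead l).length + 1 = (lookahead_alt l).length := by
  cases l with
  | nil => simp at h
  | cons x xs =>
      simp [lookahead, lookahead_alt, lookaheadGo_eq, h]

-- ===== VERDICT (by name: the statement is the Claim_ definition above) =====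
theorem lookahead_spec : Claim_unchanged_lookahead := by
  intro l _ hD
  exact lookahead_eq l hD

theorem lookahead_changed : Claim_changed_lookahead := by
  unfold Claim_changed_lookahead; decide

theorem lookahead_tight : Claim_exact_lookahead := by
  intro l _ hD heq
  have := lookahead_len l hD
  rw [heq] at this
  omega
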